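-- pv_equiv track=rewrite | github.com/D3f0/prymatex | prymatex/utils/sourcecode.py | subsearch
-- ===== SOURCE A (Python) =====
-- def subsearch(pattern, text, pstart = 0, tstart = 0, ignoreCase = False):
--     if not pattern or not text: []
--     if pstart == 0 and ignoreCase:
--         pattern = pattern.lower()
--         text = text.lower()
--     end = len(pattern)
--     begin = text.find(pattern, tstart)
--     while begin == -1 and end >= 0:
--         end -= 1
--         begin = text.find(pattern[:end], tstart)
--     if end <= 0:
--         return []
--     return [(pstart, pstart + end, begin, begin + end)] + \
--         subsearch(pattern[end:], text, pstart = end, tstart = begin + end)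
-- ===== SOURCE B (Python) =====
-- def subsearch(pattern, text, pstart = 0, tstart = 0, ignoreCase = False):
--     # Iterative with an accumulator; longest matching prefix length found by
--     # binary search on the monotone predicate "pattern[:k] occurs in text from tstart".
--     if pstart == 0 and ignoreCase:
--         pattern = pattern.lower()
--         text = text.lower()
--     out = []
--     while True:
--         lo, hi = 0, len(pattern)
--         while lo < hi:
--             mid = (lo + hi + 1) // 2
--             if text.find(pattern[:mid], tstart) != -1:
--                 lo = mid
--             else:
--                 hi = mid - 1
--         if lo == 0:
--             return out
--         begin = text.find(pattern[:lo], tstart)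
--         out.append((pstart, pstart + lo, begin, begin + lo))
--         pattern, pstart, tstart = pattern[lo:], lo, begin + lo
-- ===== Notes on version B (the rewrite author's own statement) =====
-- stated objective: faster
-- what changed: The longest found prefix length is located by binary search on the monotone predicate 'pattern[:k] occurs in text from tstart' (O(log m) find calls per level) instead of A's linear decrement from len(pattern) (O(m) find calls per level), and A's recursion is replaced by an iterative accumulator loop.
import Mathlib
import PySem

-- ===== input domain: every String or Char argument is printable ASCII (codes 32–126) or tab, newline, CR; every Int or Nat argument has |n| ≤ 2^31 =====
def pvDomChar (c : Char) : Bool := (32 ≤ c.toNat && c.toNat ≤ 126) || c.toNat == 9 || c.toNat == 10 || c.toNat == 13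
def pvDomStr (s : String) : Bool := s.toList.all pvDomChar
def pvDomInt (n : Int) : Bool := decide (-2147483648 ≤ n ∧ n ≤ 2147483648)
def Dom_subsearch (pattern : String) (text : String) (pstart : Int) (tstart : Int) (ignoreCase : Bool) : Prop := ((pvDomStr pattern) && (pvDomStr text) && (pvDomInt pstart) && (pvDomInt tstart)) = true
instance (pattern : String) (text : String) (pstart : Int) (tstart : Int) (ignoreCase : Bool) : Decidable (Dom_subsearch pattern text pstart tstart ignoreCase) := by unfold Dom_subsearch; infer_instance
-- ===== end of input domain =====

-- B replaces A's linear downward scan over prefix lengths by a binary search on the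
-- monotone predicate "pattern[:k] occurs in text from tstart", and A's recursion by an
-- accumulator loop (objective: faster).


-- ===== PORT A =====
-- A's while loop: while begin == -1 and end >= 0: end -= 1; begin = text.find(pattern[:end], tstart)
-- (fuel only makes the recursion structural; callers pass enough for the guard never to fire)
def pvLoopA (t p : List Char) (ts : Int) : Nat → Int → Int → Int × Int
  | 0, e, b => (e, b)
  | fuel + 1, e, b =>
    if b = -1 ∧ 0 ≤ e then
      pvLoopA t p ts fuel (e - 1) (PySem.Chars.findFrom t (PySem.List.slice p none (some (e - 1))) ts)
    else (e, b)

-- A itself, on char lists (the recursive call passes ignoreCase's default False, as the Python does)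
def subsearchA : Nat → List Char → List Char → Int → Int → Bool → List (List Int)
  | 0, _, _, _, _, _ => []
  | fuel + 1, p, t, pstart, tstart, ignoreCase =>
    let p1 := if pstart = 0 ∧ ignoreCase = true then PySem.Chars.lower p else p
    let t1 := if pstart = 0 ∧ ignoreCase = true then PySem.Chars.lower t else t
    let r := pvLoopA t1 p1 tstart (p1.length + 2) (p1.length : Int) (PySem.Chars.findFrom t1 p1 tstart)
    if r.1 ≤ 0 then []
    else [pstart, pstart + r.1, r.2, r.2 + r.1] ::
      subsearchA fuel (PySem.List.slice p1 (some r.1) none) t1 r.1 (r.2 + r.1) false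

def subsearch (pattern : String) (text : String) (pstart : Int) (tstart : Int) (ignoreCase : Bool) : List (List Int) :=
  subsearchA (pattern.toList.length + 1) pattern.toList text.toList pstart tstart ignoreCase

-- ===== PORT B =====
-- B's inner loop: binary search for the largest k with text.find(pattern[:k], tstart) != -1
def pvBsK (t p : List Char) (ts : Int) : Nat → Int → Int → Int
  | 0, lo, _ => lo
  | fuel + 1, lo, hi =>
    if lo < hi then
      let mid := PySem.Int.floordiv (lo + hi + 1) 2
      if PySem.Chars.findFrom t (PySem.List.slice p none (some mid)) ts ≠ -1 then
        pvBsK t p ts fuel mid hi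
      else
        pvBsK t p ts fuel lo (mid - 1)
    else lo

-- B's outer while-True loop with accumulator `out`
def pvLoopB : Nat → List Char → List Char → Int → Int → List (List Int) → List (List Int)
  | 0, _, _, _, _, out => out
  | fuel + 1, p, t, pstart, tstart, out =>
    let k := pvBsK t p tstart (p.length + 1) 0 (p.length : Int)
    if k = 0 then out
    else
      let b := PySem.Chars.findFrom t (PySem.List.slice p none (some k)) tstart
      pvLoopB fuel (PySem.List.slice p (some k) none) t k (b + k)
        (out ++ [[pstart, pstart + k, b, b + k]])

def subsearch_alt (pattern : String) (text : String) (pstart : Int) (tstart : Int) (ignoreCase : Bool) : List (List Int) :=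
  let p := if pstart = 0 ∧ ignoreCase = true then PySem.Chars.lower pattern.toList else pattern.toList
  let t := if pstart = 0 ∧ ignoreCase = true then PySem.Chars.lower text.toList else text.toList
  pvLoopB (p.length + 1) p t pstart tstart []

-- ===== PRECONDITION & SPEC =====
def Spec_subsearch (pattern : String) (text : String) (pstart : Int) (tstart : Int) (ignoreCase : Bool) (out : List (List Int)) : Prop := out = subsearch_alt pattern text pstart tstart ignoreCase
instance (pattern : String) (text : String) (pstart : Int) (tstart : Int) (ignoreCase : Bool) (out : List (List Int)) : Decidable (Spec_subsearch pattern text pstart tstart ignoreCase out) := by unfold Spec_subsearch; infer_instance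

-- ===== CLAIM (what is proved, stated in full; the proofs are below) =====
def Claim_equal_subsearch : Prop := ∀ (pattern : String) (text : String) (pstart : Int) (tstart : Int) (ignoreCase : Bool), Dom_subsearch pattern text pstart tstart ignoreCase → Spec_subsearch pattern text pstart tstart ignoreCase (subsearch pattern text pstart tstart ignoreCase)

-- ===== LEMMAS AND PROOFS =====

-- "pattern[:k] occurs in text searching from tstart" (abbrev so DecidablePred is inferred)
abbrev pvFound (t p : List Char) (ts : Int) (k : Nat) : Prop :=
  PySem.Chars.findFrom t (p.take k) ts ≠ -1

-- the greatest prefix length that is found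
def pvK (t p : List Char) (ts : Int) : Nat :=
  Nat.findGreatest (pvFound t p ts) p.length

theorem pvSlice_cast (p : List Char) (m : Nat) :
    PySem.List.slice p none (some (m : Int)) = p.take m := by
  rw [PySem.List.slice_to _ (by positivity)]; simp

theorem pvMid_bounds {lo hi : Int} (h : lo < hi) :
    lo < PySem.Int.floordiv (lo + hi + 1) 2 ∧ PySem.Int.floordiv (lo + hi + 1) 2 ≤ hi := by
  rw [PySem.Int.floordiv_eq_ediv_of_pos (by norm_num)]
  have h1 := Int.mul_ediv_add_emod (lo + hi + 1) 2
  have h2 := Int.emod_nonneg (lo + hi + 1) (by norm_num : (2:Int) ≠ 0)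
  have h3 := Int.emod_lt_of_pos (lo + hi + 1) (by norm_num : (0:Int) < 2)
  omega

-- the predicate is antitone in the prefix length
theorem pvFound_mono (t p : List Char) (ts : Int) {j k : Nat} (hjk : j ≤ k)
    (h : pvFound t p ts k) : pvFound t p ts j := by
  unfold pvFound at h ⊢
  simp only [PySem.Chars.findFrom] at h ⊢
  set st : Int := if ts < 0 then if ts + ↑t.length < 0 then 0 else ts + ↑t.length else ts with hst
  have hst0 : 0 ≤ st := by rw [hst]; split_ifs <;> omega
  by_cases hc : (t.length : Int) < st
  · simp [hc] at h
  · simp only [if_neg hc] at h ⊢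
    have htake : List.take (Int.toNat ↑t.length) t = t := by simp
    rw [htake] at h ⊢
    by_cases hf : PySem.Chars.find (List.drop st.toNat t) (List.take k p) = -1
    · simp [hf] at h
    · have hinf : List.take k p <:+: List.drop st.toNat t :=
        (PySem.Chars.find_ne_neg_one_iff _ _).mp hf
      have hpref : List.take j p <+: List.take k p := by
        have : List.take j p = List.take j (List.take k p) := by
          rw [List.take_take, min_eq_left hjk]
        rw [this]; exact List.take_prefix _ _
      have hinf2 : List.take j p <:+: List.drop st.toNat t := hpref.isInfix.trans hinf
      have hf2 : PySem.Chars.find (List.drop st.toNat t) (List.take j p) ≠ -1 :=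
        (PySem.Chars.find_ne_neg_one_iff _ _).mpr hinf2
      have hnn : 0 ≤ PySem.Chars.find (List.drop st.toNat t) (List.take j p) :=
        (PySem.Chars.find_nonneg_iff _ _).mpr hinf2
      simp only [if_neg hf2]
      omega

-- A's loop when no prefix length ≤ n is found: runs down to -1
theorem pvLoopA_none (t p : List Char) (ts : Int) (n : Nat) :
    ∀ fuel : Nat, n + 2 ≤ fuel →
    (∀ k : Nat, k ≤ n → ¬ pvFound t p ts k) →
    pvLoopA t p ts fuel (n : Int) (PySem.Chars.findFrom t (PySem.List.slice p none (some (n : Int))) ts)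
      = (-1, PySem.Chars.findFrom t (PySem.List.slice p none (some (-1))) ts) := by
  induction n with
  | zero =>
    intro fuel hfuel h
    match fuel, hfuel with
    | f + 2, _ =>
      have hb : PySem.Chars.findFrom t (PySem.List.slice p none (some ((0:Nat) : Int))) ts = -1 := by
        have := h 0 (le_refl _)
        unfold pvFound at this
        rw [pvSlice_cast]
        omega
      rw [pvLoopA, if_pos ⟨hb, by norm_num⟩]
      norm_num
      rw [pvLoopA, if_neg (by norm_num)]
  | succ n ih =>
    intro fuel hfuel h
    match fuel, hfuel with
    | f + 1, hfuel =>
      have hb : PySem.Chars.findFrom t (PySem.List.slice p none (some ((n+1:Nat) : Int))) ts = -1 := by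
        have := h (n+1) (le_refl _)
        unfold pvFound at this
        rw [pvSlice_cast]
        omega
      rw [pvLoopA, if_pos ⟨hb, by positivity⟩]
      have hcast : ((n+1:Nat) : Int) - 1 = (n : Int) := by push_cast; ring
      rw [hcast]
      exact ih f (by omega) (fun k hk => h k (by omega))

-- A's loop when j is the greatest found prefix length ≤ n: stops at j
theorem pvLoopA_found (t p : List Char) (ts : Int) (n j : Nat) :
    ∀ fuel : Nat, n + 1 ≤ fuel → j ≤ n →
    pvFound t p ts j → (∀ k : Nat, j < k → k ≤ n → ¬ pvFound t p ts k) →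
    pvLoopA t p ts fuel (n : Int) (PySem.Chars.findFrom t (PySem.List.slice p none (some (n : Int))) ts)
      = ((j : Int), PySem.Chars.findFrom t (PySem.List.slice p none (some (j : Int))) ts) := by
  induction n with
  | zero =>
    intro fuel hfuel hj hf hmax
    have hj0 : j = 0 := by omega
    subst hj0
    match fuel, hfuel with
    | f + 1, _ =>
      have hb : PySem.Chars.findFrom t (PySem.List.slice p none (some ((0:Nat) : Int))) ts ≠ -1 := by
        unfold pvFound at hf; rw [pvSlice_cast]; exact hf
      rw [pvLoopA, if_neg (by intro hc; exact hb hc.1)]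
  | succ n ih =>
    intro fuel hfuel hj hf hmax
    match fuel, hfuel with
    | f + 1, hfuel =>
      by_cases hjn : j = n + 1
      · subst hjn
        have hb : PySem.Chars.findFrom t (PySem.List.slice p none (some ((n+1:Nat) : Int))) ts ≠ -1 := by
          unfold pvFound at hf; rw [pvSlice_cast]; exact hf
        rw [pvLoopA, if_neg (by intro hc; exact hb hc.1)]
      · have hb : PySem.Chars.findFrom t (PySem.List.slice p none (some ((n+1:Nat) : Int))) ts = -1 := by
          have := hmax (n+1) (by omega) (le_refl _)
          unfold pvFound at this
          rw [pvSlice_cast]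
          omega
        rw [pvLoopA, if_pos ⟨hb, by positivity⟩]
        have hcast : ((n+1:Nat) : Int) - 1 = (n : Int) := by push_cast; ring
        rw [hcast]
        exact ih f (by omega) (by omega) hf (fun k hk1 hk2 => hmax k hk1 (by omega))

-- B's binary search computes pvK
theorem pvBsK_eq (t p : List Char) (ts : Int) :
    ∀ (fuel : Nat) (lo hi : Int), hi - lo < (fuel : Int) →
    0 ≤ lo → lo ≤ hi → hi ≤ (p.length : Int) →
    (lo = 0 ∨ pvFound t p ts lo.toNat) →
    (∀ k : Nat, hi < (k : Int) → k ≤ p.length → ¬ pvFound t p ts k) →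
    pvBsK t p ts fuel lo hi = (pvK t p ts : Int) := by
  intro fuel
  induction fuel with
  | zero =>
    intro lo hi hfuel hlo hlohi hhi h1 h2
    omega
  | succ f ih =>
    intro lo hi hfuel hlo hlohi hhi h1 h2
    by_cases hlt : lo < hi
    · rw [pvBsK, if_pos hlt]
      dsimp only
      set mid : Int := PySem.Int.floordiv (lo + hi + 1) 2 with hmid
      have hb := pvMid_bounds hlt
      rw [← hmid] at hb
      by_cases hf : PySem.Chars.findFrom t (PySem.List.slice p none (some mid)) ts ≠ -1
      · rw [if_pos hf]
        apply ih mid hi (by omega) (by omega) (by omega) hhi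
        · right
          unfold pvFound
          rw [← pvSlice_cast]
          have : ((mid.toNat : Nat) : Int) = mid := by omega
          rw [this]
          exact hf
        · exact h2
      · rw [if_neg hf]
        have hnf : ¬ pvFound t p ts mid.toNat := by
          unfold pvFound
          rw [← pvSlice_cast]
          have : ((mid.toNat : Nat) : Int) = mid := by omega
          rw [this]
          simpa using hf
        apply ih lo (mid - 1) (by omega) (by omega) (by omega) (by omega) h1
        intro k hk1 hk2
        by_cases hk3 : hi < (k : Int)
        · exact h2 k hk3 hk2
        · intro hfk
          exact hnf (pvFound_mono t p ts (by omega) hfk)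
    · rw [pvBsK, if_neg hlt]
      have hlohi' : lo = hi := by omega
      subst hlohi'
      by_cases hP : pvFound t p ts lo.toNat
      · have hle : lo.toNat ≤ pvK t p ts :=
          Nat.le_findGreatest (by omega) hP
        have hge : pvK t p ts ≤ lo.toNat := by
          by_contra hgt
          have hgt' : lo.toNat < pvK t p ts := by omega
          have hPK : pvFound t p ts (pvK t p ts) := Nat.findGreatest_spec (by omega) hP
          exact h2 (pvK t p ts) (by omega) (Nat.findGreatest_le _) hPK
        omega
      · rcases h1 with h1 | h1
        · have hK : pvK t p ts = 0 := by
            rw [pvK, Nat.findGreatest_eq_zero_iff]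
            intro m hm1 hm2
            apply h2 m (by omega) hm2
          omega
        · exact absurd h1 hP

-- main loop equivalence (on the already case-adjusted strings; A's recursion carries ignoreCase=False)
theorem pvLoopB_eq_subsearchA :
    ∀ (fa fb : Nat) (p t : List Char) (ps ts : Int) (out : List (List Int)),
      p.length < fa → p.length < fb →
      pvLoopB fb p t ps ts out = out ++ subsearchA fa p t ps ts false := by
  intro fa
  induction fa with
  | zero =>
    intro fb p t ps ts out hfa hfb
    omega
  | succ fa ih =>
    intro fb p t ps ts out hfa hfb
    match fb, hfb with
    | fb + 1, hfb =>
      have hK : pvBsK t p ts (p.length + 1) 0 (p.length : Int) = (pvK t p ts : Int) := by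
        apply pvBsK_eq t p ts (p.length + 1) 0 (p.length : Int) (by push_cast; omega)
          le_rfl (by positivity) le_rfl (Or.inl rfl)
        intro k hk1 hk2
        omega
      have hfull : PySem.List.slice p none (some ((p.length : Nat) : Int)) = p := by
        rw [pvSlice_cast, List.take_length]
      rw [pvLoopB]
      rw [subsearchA]
      simp only [Bool.false_eq_true, and_false, if_false]
      rw [hK]
      by_cases hex : ∃ j, j ≤ p.length ∧ pvFound t p ts j
      · obtain ⟨j, hj, hPj⟩ := hex
        have hPK : pvFound t p ts (pvK t p ts) := Nat.findGreatest_spec hj hPj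
        have hmax : ∀ k : Nat, pvK t p ts < k → k ≤ p.length → ¬ pvFound t p ts k :=
          fun k h1 h2 => Nat.findGreatest_is_greatest h1 h2
        have hKle : pvK t p ts ≤ p.length := Nat.findGreatest_le _
        have hr := pvLoopA_found t p ts p.length (pvK t p ts) (p.length + 2) (by omega) hKle hPK hmax
        rw [hfull] at hr
        rw [hr]
        by_cases hK0 : pvK t p ts = 0
        · rw [hK0]
          norm_num
        · rw [if_neg (by omega : ¬ ((pvK t p ts : Int) = 0)),
            if_neg (by simp; omega : ¬ (((pvK t p ts : Int), PySem.Chars.findFrom t (PySem.List.slice p none (some ((pvK t p ts : Nat) : Int))) ts).1 ≤ 0))]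
          rw [ih fb _ _ _ _ _
            (by rw [PySem.List.slice_from _ (by positivity)]; simp; omega)
            (by rw [PySem.List.slice_from _ (by positivity)]; simp; omega)]
          simp
      · have hnone : ∀ k : Nat, k ≤ p.length → ¬ pvFound t p ts k := by
          intro k hk hf
          exact hex ⟨k, hk, hf⟩
        have hK0 : pvK t p ts = 0 := by
          rw [pvK, Nat.findGreatest_eq_zero_iff]
          intro m hm1 hm2
          exact hnone m hm2
        have hr := pvLoopA_none t p ts p.length (p.length + 2) (by omega) hnone
        rw [hfull] at hr
        rw [hr, hK0]
        norm_num

-- subsearchA first lowers (or not) and then behaves as with ignoreCase=False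
theorem subsearchA_lower (fuel : Nat) (p t : List Char) (ps ts : Int) (ic : Bool) :
    subsearchA fuel p t ps ts ic =
      subsearchA fuel (if ps = 0 ∧ ic = true then PySem.Chars.lower p else p)
        (if ps = 0 ∧ ic = true then PySem.Chars.lower t else t) ps ts false := by
  match fuel with
  | 0 => rfl
  | fuel + 1 =>
    conv_lhs => rw [subsearchA]
    conv_rhs => rw [subsearchA]
    simp only [Bool.false_eq_true, and_false, if_false]

theorem pvLower_length (c : Prop) [Decidable c] (p : List Char) :
    (if c then PySem.Chars.lower p else p).length = p.length := by
  split <;> simp [PySem.Chars.lower]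

-- ===== VERDICT (by name: the statement is the Claim_ definition above) =====
theorem subsearch_spec : Claim_equal_subsearch := by
  intro pattern text pstart tstart ignoreCase _
  unfold Spec_subsearch subsearch subsearch_alt
  rw [subsearchA_lower]
  rw [pvLoopB_eq_subsearchA (pattern.toList.length + 1)
    ((if pstart = 0 ∧ ignoreCase = true then PySem.Chars.lower pattern.toList else pattern.toList).length + 1)
    _ _ _ _ _ (by rw [pvLower_length]; omega) (by rw [pvLower_length]; omega)]
  simp
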